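/- GENERATED by farm/mkstatement.py from design/units.tsv (unit `compute_sorted_huffman.4`) and the assertions of Vorbis/Spec/Codebook/SortedHuffman.lean — do not edit.
   THE STATEMENT of the proof unit `compute_sorted_huffman.4`: segment 4 of `compute_sorted_huffman` (8 instructions; entries 0x10b551;
   exits ret; ranges 0x10b551-0x10b55f)
   takes each of its entry assertions to one of its exit assertions (`Vorbis.Spec.SortedHuffman.Claim4`), given the contracts of its callees.
   What the names mean: Vorbis/Spec/Basic.lean (the shared hypotheses), Vorbis/Spec/Codebook/SortedHuffman.lean (the assertions). The theorem to prove: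
   `theorem compute_sorted_huffman_4_ok : Vorbis.Spec.compute_sorted_huffman_4.Statement`. -/
import Vorbis.Spec.Codebook.SortedHuffman
namespace Vorbis.Spec.compute_sorted_huffman_4
open X86 X86.User Asan

/-- The statement of unit `compute_sorted_huffman.4`. -/
def Statement : Prop :=
  ∀ (Lay : Layout) (_hLay : Lay.hi = 0x1000000) (μ : Microarch) (_hμ : UserX.MicroOK μ) (u₀ : State)
    (_hcode : HasCodeNat Lay u₀ Vorbis.L.compute_sorted_huffman.entry Vorbis.Code.code_compute_sorted_huffman.nat Vorbis.L.compute_sorted_huffman.size),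
    Vorbis.Spec.SortedHuffman.Claim4 Lay μ u₀

end Vorbis.Spec.compute_sorted_huffman_4
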